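-- pv_equiv track=rewrite | github.com/emnopal/hackerrank-test | RemainderSorting/RemainderSorting.py | RemainderSorting
-- ===== SOURCE A (Python) =====
-- from collections import defaultdict
-- from typing import List, Dict
--
-- def RemainderSorting(strArr: List[str]) -> List[str]:
--
--     arr: defaultdict[int, List[str]] = defaultdict(list)
--     for ele in strArr:
--         arr[len(ele)%3].append(ele)
--
--     arr_sorted_value: Dict[int, List[str]] = {}
--     for key, value in arr.items():
--         arr_sorted_value[key] = sorted(value)
--
--     arr_sorted_key = dict(sorted(arr_sorted_value.items()))
--
--     arr_sorted_final = [ele for ele_list in list(arr_sorted_key.values()) for ele in ele_list]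
--
--     return arr_sorted_final
-- ===== SOURCE B (Python) =====
-- from typing import List
--
-- def RemainderSorting(strArr: List[str]) -> List[str]:
--     return sorted(strArr, key=lambda s: (len(s) % 3, s))
-- ===== Notes on version B (the rewrite author's own statement) =====
-- stated objective: simpler
-- what changed: Replaces the bucket-into-dict / sort-each-bucket / sort-keys / concatenate pipeline by a single sort with the compound key (len(s) % 3, s).
import Mathlib
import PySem

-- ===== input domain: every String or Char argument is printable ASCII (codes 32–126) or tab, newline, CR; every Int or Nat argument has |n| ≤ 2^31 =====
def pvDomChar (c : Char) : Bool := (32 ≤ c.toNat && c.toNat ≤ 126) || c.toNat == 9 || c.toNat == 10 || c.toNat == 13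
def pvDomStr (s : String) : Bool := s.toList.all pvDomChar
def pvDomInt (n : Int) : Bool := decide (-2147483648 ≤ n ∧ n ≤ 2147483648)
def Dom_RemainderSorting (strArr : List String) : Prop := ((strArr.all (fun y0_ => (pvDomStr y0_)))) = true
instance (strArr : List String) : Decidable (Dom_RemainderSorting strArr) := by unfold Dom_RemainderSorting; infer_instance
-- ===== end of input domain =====

-- B replaces A's bucket-into-dict / sort-each-bucket / sort-keys / concatenate pipeline by a
-- single sort with the compound key (len(s) % 3, s); objective: simpler.

-- ===== PORT A =====
-- len(ele) % 3, shared by both ports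
def pvKey (s : String) : Int := PySem.Int.mod (PySem.Str.len s) 3

def RemainderSorting (strArr : List String) : List String :=
  -- arr[len(ele)%3].append(ele)
  let arr : PySem.Dict Int (List String) :=
    strArr.foldl (fun d ele => d.modify (pvKey ele) [] (fun v => v ++ [ele])) PySem.Dict.empty
  -- arr_sorted_value[key] = sorted(value)
  let arrSortedValue : PySem.Dict Int (List String) :=
    arr.items.foldl (fun d p => d.insert p.1 (PySem.List.sorted p.2 (fun x => x) false)) PySem.Dict.empty
  -- dict(sorted(arr_sorted_value.items())): Python sorts the (key, value) tuples; the keys of a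
  -- dict are distinct, so the comparison never reaches the values — sorting by the key is exact
  let arrSortedKey : PySem.Dict Int (List String) :=
    PySem.Dict.ofList (PySem.List.sorted arrSortedValue.items (fun p => p.1) false)
  -- [ele for ele_list in list(arr_sorted_key.values()) for ele in ele_list]
  arrSortedKey.values.flatten

-- ===== PORT B =====
def RemainderSorting_alt (strArr : List String) : List String :=
  PySem.List.sorted2 strArr (fun s => pvKey s) (fun s => s) false

-- ===== PRECONDITION & SPEC =====
def Spec_RemainderSorting (strArr : List String) (out : List String) : Prop := out = RemainderSorting_alt strArr
instance (strArr : List String) (out : List String) : Decidable (Spec_RemainderSorting strArr out) := by unfold Spec_RemainderSorting; infer_instance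

-- ===== CLAIM (what is proved, stated in full; the proofs are below) =====
def Claim_equal_RemainderSorting : Prop := ∀ (strArr : List String), Dom_RemainderSorting strArr → Spec_RemainderSorting strArr (RemainderSorting strArr)

-- ===== LEMMAS AND PROOFS =====

-- the compound key (len % 3, s) as a lexicographic pair
def pvLexKey (s : String) : Int ×ₗ String := toLex (pvKey s, s)

theorem pvLexKey_injective : Function.Injective pvLexKey := by
  intro a b h
  have := toLex.injective h
  exact (Prod.mk.injEq _ _ _ _ ▸ this).2

-- sorted2's comparison is exactly the lexicographic-pair comparison
theorem before_eq (a b : String) :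
    (decide (pvKey a < pvKey b) || (!decide (pvKey b < pvKey a) && decide (a < b)))
      = decide (pvLexKey a < pvLexKey b) := by
  have h : (pvLexKey a < pvLexKey b) ↔ (pvKey a < pvKey b ∨ (pvKey a = pvKey b ∧ a < b)) :=
    Prod.Lex.toLex_lt_toLex
  by_cases h1 : pvKey a < pvKey b <;> by_cases h2 : pvKey b < pvKey a <;> by_cases h3 : a < b <;>
    simp [h1, h2, h3, h] <;> omega

-- B's sorted2 is sorted with the lexicographic key
theorem alt_eq_sorted_lex (strArr : List String) :
    RemainderSorting_alt strArr = PySem.List.sorted strArr pvLexKey false := by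
  unfold RemainderSorting_alt
  show List.foldl (fun acc x => PySem.List.insertBy _ x acc) [] strArr
      = List.foldl (fun acc x => PySem.List.insertBy _ x acc) [] strArr
  congr 1
  funext acc x
  congr 1
  funext p q
  exact before_eq p q

-- the canonical form both sides are reduced to: the sorted distinct keys, each replaced by its
-- alphabetically sorted bucket, concatenated
def pvCanon (strArr : List String) : List String :=
  ((PySem.List.sorted (PySem.Set.ofList (strArr.map pvKey)) (fun x => x) false).map
    (fun k => PySem.List.sorted (strArr.filter (fun e => pvKey e == k)) (fun x => x) false)).flatten

theorem A_eq_canon (strArr : List String) : RemainderSorting strArr = pvCanon strArr := by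
  unfold RemainderSorting pvCanon
  dsimp only
  set d1 : PySem.Dict Int (List String) :=
    strArr.foldl (fun d ele => d.modify (pvKey ele) [] (fun v => v ++ [ele])) PySem.Dict.empty with hd1
  -- keys of d1
  have hkeys : d1.keys = PySem.Set.ofList (strArr.map pvKey) := by
    rw [hd1, PySem.Dict.keys_foldl_modify_key strArr pvKey [] (fun _ ele => (fun v => v ++ [ele])) PySem.Dict.empty]
    simp [PySem.Dict.keys_empty, PySem.Set.update_nil_left]
  have hnd1 : d1.keys.Nodup := by rw [hkeys]; exact PySem.Set.nodup_ofList _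
  -- lookups of d1
  have hgetD : ∀ c, d1.getD c [] = strArr.filter (fun e => pvKey e == c) := by
    intro c
    rw [hd1]
    rw [show (strArr.foldl (fun d ele => d.modify (pvKey ele) [] (fun v => v ++ [ele])) PySem.Dict.empty)
        = ((strArr.map (fun e => (pvKey e, e))).foldl (fun d p => d.modify p.1 [] (fun v => v ++ [p.2])) PySem.Dict.empty) by
      rw [List.foldl_map]]
    rw [PySem.Dict.getD_foldl_modify_append]
    simp [PySem.Dict.getD_empty, List.filter_map, Function.comp_def, List.map_map]
  -- items of d1
  have hitems1 : d1.items = d1.keys.map (fun k => (k, strArr.filter (fun e => pvKey e == k))) := by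
    rw [PySem.Dict.items_eq_map_keys d1 hnd1 []]
    exact List.map_congr_left (fun k _ => by rw [hgetD])
  -- second dict: fresh distinct keys, so the insert loop appends
  set d2 : PySem.Dict Int (List String) :=
    d1.items.foldl (fun d p => d.insert p.1 (PySem.List.sorted p.2 (fun x => x) false)) PySem.Dict.empty with hd2
  have hitems2 : d2.items = d1.keys.map
      (fun k => (k, PySem.List.sorted (strArr.filter (fun e => pvKey e == k)) (fun x => x) false)) := by
    rw [hd2, PySem.Dict.items_foldl_insert_fresh d1.items (fun p => p.1)
      (fun p => PySem.List.sorted p.2 (fun x => x) false) PySem.Dict.empty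
      (fun a _ => PySem.Dict.contains_empty _) (by
        have : d1.items.map (fun p => p.1) = d1.keys := rfl
        rw [this]; exact hnd1)]
    rw [hitems1]
    have hempty : (PySem.Dict.empty : PySem.Dict Int (List String)).items = [] := rfl
    simp [hempty, List.map_map, Function.comp_def]
  -- sorting the items by key
  set Ks := PySem.List.sorted (PySem.Set.ofList (strArr.map pvKey)) (fun x => x) false with hKs
  have hKlt : Ks.Pairwise (fun a b => a < b) := PySem.List.sorted_ofList_pairwise_lt _
  have hsorted : PySem.List.sorted d2.items (fun p => p.1) false
      = Ks.map (fun k => (k, PySem.List.sorted (strArr.filter (fun e => pvKey e == k)) (fun x => x) false)) := by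
    apply PySem.List.sorted_eq_of_perm_of_pairwise_lt
    · rw [hitems2]
      exact List.Perm.map _ ((PySem.List.sorted_perm _ _ false).trans (by rw [hkeys]))
    · exact List.Pairwise.map _ (fun a b h => h) hKlt
  rw [hsorted]
  -- final dict: strictly increasing (hence fresh distinct) keys, so its values are the buckets
  have hfresh := PySem.Dict.items_foldl_insert_fresh
    (Ks.map (fun k => (k, PySem.List.sorted (strArr.filter (fun e => pvKey e == k)) (fun x => x) false)))
    (fun p => p.1) (fun p => p.2) PySem.Dict.empty
    (fun a _ => PySem.Dict.contains_empty _)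
    (by simp [List.map_map, Function.comp_def]; exact hKlt.nodup)
  have hvals : (PySem.Dict.ofList (Ks.map (fun k => (k, PySem.List.sorted (strArr.filter (fun e => pvKey e == k)) (fun x => x) false)))).values
      = Ks.map (fun k => PySem.List.sorted (strArr.filter (fun e => pvKey e == k)) (fun x => x) false) := by
    show ((PySem.Dict.ofList _).items.map (fun p => p.2)) = _
    rw [PySem.Dict.ofList, PySem.Dict.update, hfresh]
    have hempty : (PySem.Dict.empty : PySem.Dict Int (List String)).items = [] := rfl
    simp [hempty, List.map_map, Function.comp_def]
  rw [hvals]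

-- the canonical form is a permutation of the input (Ks: any Nodup key list covering the input)
theorem canon_perm (Ks : List Int) (l : List String) (hnd : Ks.Nodup)
    (hcov : ∀ e ∈ l, pvKey e ∈ Ks) :
    ((Ks.map (fun k => PySem.List.sorted (l.filter (fun e => pvKey e == k)) (fun x => x) false)).flatten).Perm l := by
  induction Ks generalizing l with
  | nil =>
    have : l = [] := List.eq_nil_iff_forall_not_mem.2 (fun e he => by simpa using hcov e he)
    simp [this]
  | cons k t ih =>
    have hk : k ∉ t := (List.nodup_cons.1 hnd).1
    have hnd' : t.Nodup := (List.nodup_cons.1 hnd).2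
    set l' := l.filter (fun e => !(pvKey e == k)) with hl'
    have hmapeq : t.map (fun k' => PySem.List.sorted (l.filter (fun e => pvKey e == k')) (fun x => x) false)
        = t.map (fun k' => PySem.List.sorted (l'.filter (fun e => pvKey e == k')) (fun x => x) false) := by
      apply List.map_congr_left
      intro k' hk'
      have hne : k' ≠ k := by rintro rfl; exact hk hk'
      congr 1
      rw [hl', List.filter_filter]
      apply List.filter_congr
      intro e _
      by_cases h : pvKey e = k' <;> simp [h, hne]
    have hcov' : ∀ e ∈ l', pvKey e ∈ t := by
      intro e he
      have h1 := List.of_mem_filter he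
      have h2 := hcov e (List.mem_of_mem_filter he)
      simp at h1
      rcases List.mem_cons.1 h2 with h | h
      · exact absurd h h1
      · exact h
    have heq : (List.map (fun k => PySem.List.sorted (l.filter (fun e => pvKey e == k)) (fun x => x) false) (k :: t)).flatten
        = PySem.List.sorted (l.filter (fun e => pvKey e == k)) (fun x => x) false
            ++ (t.map (fun k' => PySem.List.sorted (l'.filter (fun e => pvKey e == k')) (fun x => x) false)).flatten := by
      rw [List.map_cons, List.flatten_cons, hmapeq]
    rw [heq]
    exact ((PySem.List.sorted_perm _ _ false).append (ih l' hnd' hcov')).trans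
      (List.filter_append_perm _ l)

theorem lex_le_of (a b : String) (h : pvKey a < pvKey b ∨ (pvKey a = pvKey b ∧ a ≤ b)) :
    pvLexKey a ≤ pvLexKey b := Prod.Lex.toLex_le_toLex.2 h

-- the canonical form is ordered by the lexicographic key
theorem canon_pairwise (strArr : List String) :
    (pvCanon strArr).Pairwise (fun a b => pvLexKey a ≤ pvLexKey b) := by
  unfold pvCanon
  rw [List.pairwise_flatten]
  constructor
  · intro gl hgl
    rcases List.mem_map.1 hgl with ⟨k, hk, rfl⟩
    refine List.Pairwise.imp_of_mem ?_ (PySem.List.sorted_pairwise _ (fun x => x))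
    intro a b ha hb hle
    have ha' : pvKey a = k := by
      have := List.of_mem_filter ((PySem.List.sorted_perm _ _ false).subset ha)
      simpa using this
    have hb' : pvKey b = k := by
      have := List.of_mem_filter ((PySem.List.sorted_perm _ _ false).subset hb)
      simpa using this
    exact lex_le_of a b (Or.inr ⟨ha'.trans hb'.symm, hle⟩)
  · have hlt := PySem.List.sorted_ofList_pairwise_lt (strArr.map pvKey)
    refine List.Pairwise.map _ ?_ hlt
    intro k k' hkk' x hx y hy
    have hx' : pvKey x = k := by
      have := List.of_mem_filter ((PySem.List.sorted_perm _ _ false).subset hx)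
      simpa using this
    have hy' : pvKey y = k' := by
      have := List.of_mem_filter ((PySem.List.sorted_perm _ _ false).subset hy)
      simpa using this
    exact lex_le_of x y (Or.inl (by rw [hx', hy']; exact hkk'))

-- uniqueness of the ordered permutation: the canonical form IS the lexicographic sort
theorem canon_eq_sorted_lex (strArr : List String) :
    pvCanon strArr = PySem.List.sorted strArr pvLexKey false := by
  apply PySem.List.eq_of_perm_of_pairwise_le_of_injective pvLexKey pvLexKey_injective
  · refine (canon_perm (PySem.List.sorted (PySem.Set.ofList (strArr.map pvKey)) (fun x => x) false)
      strArr ?_ ?_).trans (PySem.List.sorted_perm strArr pvLexKey false).symm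
    · exact ((PySem.List.sorted_perm _ _ false).symm).nodup (PySem.Set.nodup_ofList _)
    · intro e he
      exact (PySem.List.sorted_perm _ _ false).mem_iff.2
        ((PySem.Set.mem_ofList _ _).2 (List.mem_map_of_mem he))
  · exact canon_pairwise strArr
  · exact PySem.List.sorted_pairwise strArr pvLexKey

-- ===== VERDICT (by name: the statement is the Claim_ definition above) =====
theorem RemainderSorting_spec : Claim_equal_RemainderSorting := by
  intro strArr _
  unfold Spec_RemainderSorting
  rw [alt_eq_sorted_lex, A_eq_canon, canon_eq_sorted_lex]
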